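-- pv_equiv track=rewrite | github.com/gitak83/CAD | lut_new.py | expand_k_lut
-- ===== SOURCE A (Python) =====
-- def expand_k_lut(constant, k, assignment):
--     """Expand k-LUT to 8-LUT using given input assignment"""
--     lut8 = 0
--     for addr in range(256):
--         # Build index from assigned bits
--         index = 0
--         for i, pos in enumerate(assignment):
--             bit = (addr >> pos) & 1
--             index |= (bit << i)
--
--         # Get output bit from constant
--         if index < (1 << k):
--             bit_output = (constant >> index) & 1
--         else:
--             bit_output = 0
--         lut8 |= (bit_output << addr)
--     return lut8
-- ===== SOURCE B (Python) =====
-- def expand_k_lut(constant, k, assignment):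
--     """Expand k-LUT to 8-LUT using given input assignment"""
--     # One pass over the assignment: scatter each input's index weight onto the
--     # address bit it reads (bits >= 8 never see a 1 in an 8-bit address).
--     weights = [0] * 8
--     for i, pos in enumerate(assignment):
--         if 0 <= pos < 8:
--             weights[pos] |= 1 << i
--     limit = 1 << k
--     lut8 = 0
--     for addr in range(256):
--         index = 0
--         for b in range(8):
--             if (addr >> b) & 1:
--                 index |= weights[b]
--         if index < limit:
--             lut8 |= ((constant >> index) & 1) << addr
--     return lut8
-- ===== Notes on version B (the rewrite author's own statement) =====
-- stated objective: faster
-- what changed: Instead of recomputing the k-bit index by scanning the whole assignment for each of the 256 addresses, B makes one pass over the assignment to scatter each input's index weight onto the address bit it reads, then builds each address's index from at most 8 precomputed weights.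
import Mathlib
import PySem

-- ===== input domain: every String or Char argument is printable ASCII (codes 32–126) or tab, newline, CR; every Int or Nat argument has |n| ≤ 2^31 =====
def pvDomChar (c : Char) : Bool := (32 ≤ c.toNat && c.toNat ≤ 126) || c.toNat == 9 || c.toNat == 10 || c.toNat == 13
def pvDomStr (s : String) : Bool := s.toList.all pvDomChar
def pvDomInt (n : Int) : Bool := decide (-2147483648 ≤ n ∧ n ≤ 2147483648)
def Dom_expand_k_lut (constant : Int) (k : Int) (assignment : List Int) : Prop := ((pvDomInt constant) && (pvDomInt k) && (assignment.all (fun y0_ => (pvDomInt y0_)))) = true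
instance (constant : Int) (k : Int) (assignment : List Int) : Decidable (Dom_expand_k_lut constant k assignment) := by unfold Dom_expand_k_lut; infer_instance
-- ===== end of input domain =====

-- B replaces A's per-address scan of the whole assignment by a single scatter of the
-- assignment into 8 per-address-bit index weights (objective: faster by a constant factor
-- mechanism when the assignment is long; equivalence of the return value is proved below).

-- ===== PORT A =====
def expand_k_lut (constant : Int) (k : Int) (assignment : List Int) : Int :=
  (PySem.List.pyRange 0 256 1).foldl (fun lut8 addr =>
    -- index built from assigned bits
    let index := (PySem.List.enumerate assignment).foldl
      (fun index ip =>
        let bit := PySem.Int.band (addr >>> ip.2.toNat) 1   -- (addr >> pos) & 1; pos ≥ 0 by Pre_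
        PySem.Int.bor index (bit <<< ip.1.toNat)) 0
    let bit_output := if index < (1:Int) <<< k.toNat        -- 1 << k; k ≥ 0 by Pre_
      then PySem.Int.band (constant >>> index.toNat) 1      -- index ≥ 0 always (or of nonnegatives)
      else (0:Int)
    PySem.Int.bor lut8 (bit_output <<< addr.toNat)) 0

-- ===== PORT B =====
def expand_k_lut_alt (constant : Int) (k : Int) (assignment : List Int) : Int :=
  let weights := (PySem.List.enumerate assignment).foldl
    (fun ws ip =>
      if 0 ≤ ip.2 ∧ ip.2 < 8 then
        -- weights[pos] |= 1 << i  (read-modify-write at an index the guard proves in range)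
        ws.set ip.2.toNat (PySem.Int.bor (PySem.List.pyGetD ws ip.2 0) ((1:Int) <<< ip.1.toNat))
      else ws)
    [0, 0, 0, 0, 0, 0, 0, 0]
  let limit := (1:Int) <<< k.toNat
  (PySem.List.pyRange 0 256 1).foldl (fun lut8 addr =>
    let index := (PySem.List.pyRange 0 8 1).foldl
      (fun index b =>
        if PySem.Int.band (addr >>> b.toNat) 1 ≠ 0 then     -- Python truthiness of (addr >> b) & 1
          PySem.Int.bor index (PySem.List.pyGetD weights b 0)
        else index) 0
    if index < limit then
      PySem.Int.bor lut8 ((PySem.Int.band (constant >>> index.toNat) 1) <<< addr.toNat)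
    else lut8) 0

-- ===== PRECONDITION & SPEC =====
-- Pre_ excludes exactly the inputs where Python A raises ValueError ("negative shift
-- count"): a negative k (1 << k) or a negative position in the assignment (addr >> pos).
def Pre_expand_k_lut (constant : Int) (k : Int) (assignment : List Int) : Prop :=
  0 ≤ k ∧ ∀ p ∈ assignment, 0 ≤ p
instance (constant : Int) (k : Int) (assignment : List Int) : Decidable (Pre_expand_k_lut constant k assignment) := by unfold Pre_expand_k_lut; infer_instance

def pvWitness_expand_k_lut : Int × Int × List Int := (6, 2, [0, 1])

def Spec_expand_k_lut (constant : Int) (k : Int) (assignment : List Int) (out : Int) : Prop := out = expand_k_lut_alt constant k assignment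
instance (constant : Int) (k : Int) (assignment : List Int) (out : Int) : Decidable (Spec_expand_k_lut constant k assignment out) := by unfold Spec_expand_k_lut; infer_instance

-- ===== CLAIM (what is proved, stated in full; the proofs are below) =====
def Claim_equal_expand_k_lut : Prop := ∀ (constant : Int) (k : Int) (assignment : List Int), Dom_expand_k_lut constant k assignment → Pre_expand_k_lut constant k assignment → Spec_expand_k_lut constant k assignment (expand_k_lut constant k assignment)

-- ===== LEMMAS AND PROOFS =====

-- Nat-level mirror of A's inner index accumulation (starting at enumerate index n).
def pvIdxN (a : Nat) (ps : List Int) (n : Nat) : Nat :=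
  match ps with
  | [] => 0
  | p :: r => (((a >>> p.toNat) &&& 1) <<< n) ||| pvIdxN a r (n + 1)

-- Nat-level mirror of one weight update and of the whole weights pass.
def pvWUpd (ws : List Nat) (p : Int) (n : Nat) : List Nat :=
  if 0 ≤ p ∧ p < 8 then ws.set p.toNat (ws.getD p.toNat 0 ||| (1 <<< n)) else ws

def pvWN (ps : List Int) (n : Nat) (ws : List Nat) : List Nat :=
  match ps with
  | [] => ws
  | p :: r => pvWN r (n + 1) (pvWUpd ws p n)

-- Nat-level mirror of B's per-address index from the weights.
def pvTb (a b w : Nat) : Nat := if (a >>> b) &&& 1 ≠ 0 then w else 0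

def pvBIdx (a : Nat) (ws : List Nat) : Nat :=
  pvTb a 0 (ws.getD 0 0) ||| pvTb a 1 (ws.getD 1 0) ||| pvTb a 2 (ws.getD 2 0) |||
  pvTb a 3 (ws.getD 3 0) ||| pvTb a 4 (ws.getD 4 0) ||| pvTb a 5 (ws.getD 5 0) |||
  pvTb a 6 (ws.getD 6 0) ||| pvTb a 7 (ws.getD 7 0)

theorem pvAIdx_eq (a : Nat) (ps : List Int) (hp : ∀ p ∈ ps, 0 ≤ p) :
    ∀ (n c : Nat),
    (PySem.List.enumerate ps (n : Int)).foldl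
      (fun index ip =>
        PySem.Int.bor index ((PySem.Int.band (((a : Int)) >>> ip.2.toNat) 1) <<< ip.1.toNat))
      ((c : Nat) : Int) = ((c ||| pvIdxN a ps n : Nat) : Int) := by
  induction ps with
  | nil => intro n c; simp [pvIdxN, PySem.List.enumerate]
  | cons p r ih =>
    intro n c
    have hp0 : 0 ≤ p := hp p (by simp)
    have hr : ∀ q ∈ r, 0 ≤ q := fun q hq => hp q (by simp [hq])
    rw [PySem.List.enumerate_cons]
    simp only [List.foldl_cons]
    have hcast : PySem.Int.bor ((c : Nat) : Int)
        ((PySem.Int.band (((a : Int)) >>> ((p.toNat : Nat) : Int)) 1) <<< ((((n : Int)).toNat : Nat) : Int))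
        = (((c ||| (((a >>> p.toNat) &&& 1) <<< n) : Nat)) : Int) := by
      rw [Int.shiftRight_natCast]
      rw [show ((1:Int)) = ((1:Nat) : Int) from rfl, PySem.Int.band_natCast]
      rw [show (((n : Int)).toNat) = n from Int.toNat_natCast n]
      rw [Int.shiftLeft_natCast, PySem.Int.bor_natCast]
    rw [hcast]
    have := ih hr (n + 1) (c ||| (((a >>> p.toNat) &&& 1) <<< n))
    rw [show ((n : Int)) + 1 = (((n + 1 : Nat)) : Int) by push_cast; ring]
    rw [this]
    simp [pvIdxN, Nat.or_assoc]

theorem pvWUpd_length (ws : List Nat) (p : Int) (n : Nat) : (pvWUpd ws p n).length = ws.length := by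
  unfold pvWUpd; split_ifs <;> simp

theorem pvWeights_eq (ps : List Int) :
    ∀ (n : Nat) (ws : List Nat),
    (PySem.List.enumerate ps (n : Int)).foldl
      (fun ws' ip =>
        if 0 ≤ ip.2 ∧ ip.2 < 8 then
          ws'.set ip.2.toNat (PySem.Int.bor (PySem.List.pyGetD ws' ip.2 0) ((1:Int) <<< ip.1.toNat))
        else ws')
      (ws.map (fun (w : Nat) => (w : Int))) = (pvWN ps n ws).map (fun (w : Nat) => (w : Int)) := by
  induction ps with
  | nil => intro n ws; rfl
  | cons p r ih =>
    intro n ws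
    rw [PySem.List.enumerate_cons]
    simp only [List.foldl_cons]
    have hstep : (if 0 ≤ p ∧ p < 8 then
        (ws.map (fun (w : Nat) => (w : Int))).set p.toNat
          (PySem.Int.bor (PySem.List.pyGetD (ws.map (fun (w : Nat) => (w : Int))) p 0)
            ((1:Int) <<< (((n : Int)).toNat : Nat)))
      else ws.map (fun (w : Nat) => (w : Int))) = (pvWUpd ws p n).map (fun (w : Nat) => (w : Int)) := by
      unfold pvWUpd
      split_ifs with hcond
      · obtain ⟨hp0, hp8⟩ := hcond
        have hget : PySem.List.pyGetD (ws.map (fun (w : Nat) => (w : Int))) p 0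
            = ((ws.getD p.toNat 0 : Nat) : Int) := by
          have h := PySem.List.pyGetD_map (fun (w : Nat) => ((w : Nat) : Int)) ws p 0
          rw [Nat.cast_zero] at h
          rw [h, PySem.List.pyGetD_of_nonneg ws 0 hp0]
        rw [hget, Int.toNat_natCast]
        rw [show ((1:Int)) = ((1:Nat) : Int) from rfl, ← Int.natCast_shiftLeft, PySem.Int.bor_natCast]
        exact (List.map_set).symm
      · rfl
    rw [hstep]
    rw [show ((n : Int)) + 1 = (((n + 1 : Nat)) : Int) by push_cast; ring]
    rw [ih (n + 1) (pvWUpd ws p n)]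
    rfl

theorem pvBIdx_eq (a : Nat) (ws : List Nat) :
    (PySem.List.pyRange 0 8 1).foldl
      (fun index b =>
        if PySem.Int.band (@HShiftRight.hShiftRight Int Nat Int Int.instHShiftRightNat ((a : Int)) b.toNat) 1 ≠ 0 then
          PySem.Int.bor index (PySem.List.pyGetD (ws.map (fun (w : Nat) => (w : Int))) b 0)
        else index) (0 : Int) = ((pvBIdx a ws : Nat) : Int) := by
  have hfold : ∀ (bs : List Nat) (x : Nat),
      ((bs.map (fun (b : Nat) => (b : Int)))).foldl
        (fun index b =>
          if PySem.Int.band (@HShiftRight.hShiftRight Int Nat Int Int.instHShiftRightNat ((a : Int)) b.toNat) 1 ≠ 0 then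
            PySem.Int.bor index (PySem.List.pyGetD (ws.map (fun (w : Nat) => (w : Int))) b 0)
          else index) ((x : Nat) : Int)
      = ((bs.foldl (fun acc b => acc ||| pvTb a b (ws.getD b 0)) x : Nat) : Int) := by
    intro bs
    induction bs with
    | nil => intro x; rfl
    | cons b r ih =>
      intro x
      simp only [List.map_cons, List.foldl_cons]
      have hget : PySem.List.pyGetD (ws.map (fun (w : Nat) => (w : Int))) ((b : Nat) : Int) 0
          = ((ws.getD b 0 : Nat) : Int) := by
        have h := PySem.List.pyGetD_map (fun w => ((w : Nat) : Int)) ws ((b : Nat) : Int) 0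
        rw [Nat.cast_zero] at h
        rw [h, PySem.List.pyGetD_of_nonneg ws 0 (by positivity), Int.toNat_natCast]
      have hcond : PySem.Int.band (@HShiftRight.hShiftRight Int Nat Int Int.instHShiftRightNat ((a : Int)) ((((b : Nat) : Int)).toNat)) 1
          = (((a >>> b) &&& 1 : Nat) : Int) := by
        rw [Int.toNat_natCast, ← Int.natCast_shiftRight,
          show ((1:Int)) = ((1:Nat) : Int) from rfl, PySem.Int.band_natCast]
      rw [hcond, hget]
      by_cases h : (a >>> b) &&& 1 ≠ 0
      · rw [if_pos (by exact_mod_cast h), PySem.Int.bor_natCast, ih]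
        have : pvTb a b (ws.getD b 0) = ws.getD b 0 := by unfold pvTb; rw [if_pos h]
        rw [this]
      · rw [if_neg (by simp only [ne_eq, not_not] at h ⊢; exact_mod_cast h)]
        rw [ih]
        have : pvTb a b (ws.getD b 0) = 0 := by unfold pvTb; rw [if_neg h]
        rw [this, Nat.or_zero]
  have hrange : PySem.List.pyRange 0 8 1
      = ([0,1,2,3,4,5,6,7] : List Nat).map (fun (b : Nat) => (b : Int)) := by decide
  have h8 := hfold [0,1,2,3,4,5,6,7] 0
  rw [Nat.cast_zero] at h8
  rw [hrange, h8]
  unfold pvBIdx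
  simp [List.foldl, Nat.or_assoc]

theorem pvKeyStep (a : Nat) (ha : a < 256) (p : Int) (hp : 0 ≤ p) (n : Nat)
    (ws : List Nat) (hlen : ws.length = 8) :
    pvBIdx a (pvWUpd ws p n) = pvBIdx a ws ||| (((a >>> p.toNat) &&& 1) <<< n) := by
  by_cases hp8 : p < 8
  · rcases ws with _|⟨w0,_|⟨w1,_|⟨w2,_|⟨w3,_|⟨w4,_|⟨w5,_|⟨w6,_|⟨w7,_|⟨w8,ws⟩⟩⟩⟩⟩⟩⟩⟩⟩ <;> simp at hlen
    unfold pvWUpd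
    rw [if_pos ⟨hp, hp8⟩]
    have hq8 : p.toNat < 8 := by omega
    generalize p.toNat = q at hq8 ⊢
    by_cases h : (a >>> q) &&& 1 ≠ 0
    · have h1 : (a >>> q) &&& 1 = 1 := by
        have := Nat.and_one_is_mod (a >>> q); omega
      interval_cases q <;>
        · simp only [List.set_cons_zero, List.set_cons_succ, List.getD_cons_zero,
            List.getD_cons_succ]
          unfold pvBIdx pvTb
          simp only [List.getD_cons_zero, List.getD_cons_succ, h1]
          simp
          try ac_rfl
    · have h1 : (a >>> q) &&& 1 = 0 := by
        have := Nat.and_one_is_mod (a >>> q); omega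
      interval_cases q <;>
        · simp only [List.set_cons_zero, List.set_cons_succ, List.getD_cons_zero,
            List.getD_cons_succ]
          unfold pvBIdx pvTb
          simp only [List.getD_cons_zero, List.getD_cons_succ, h1]
          simp
          try ac_rfl
  · unfold pvWUpd
    rw [if_neg (by omega)]
    have hsh : a >>> p.toNat = 0 := by
      rw [Nat.shiftRight_eq_div_pow]
      exact Nat.div_eq_of_lt (lt_of_lt_of_le ha (by
        calc (256:Nat) = 2 ^ 8 := by norm_num
        _ ≤ 2 ^ p.toNat := Nat.pow_le_pow_right (by norm_num) (by omega)))
    rw [hsh]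
    simp

theorem pvChain (a : Nat) (ha : a < 256) (ps : List Int) (hp : ∀ p ∈ ps, 0 ≤ p) :
    ∀ (n : Nat) (ws : List Nat), ws.length = 8 →
    pvBIdx a (pvWN ps n ws) = pvBIdx a ws ||| pvIdxN a ps n := by
  induction ps with
  | nil => intro n ws _; simp [pvWN, pvIdxN]
  | cons p r ih =>
    intro n ws hlen
    have hp0 : 0 ≤ p := hp p (by simp)
    have hr : ∀ q ∈ r, 0 ≤ q := fun q hq => hp q (by simp [hq])
    have hlen' : (pvWUpd ws p n).length = 8 := by rw [pvWUpd_length]; exact hlen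
    unfold pvWN
    rw [ih hr (n + 1) (pvWUpd ws p n) hlen']
    rw [pvKeyStep a ha p hp0 n ws hlen]
    rw [show pvIdxN a (p :: r) n = (((a >>> p.toNat) &&& 1) <<< n) ||| pvIdxN a r (n + 1) from rfl]
    rw [Nat.or_assoc]

theorem pvBIdx_zeros (a : Nat) : pvBIdx a [0,0,0,0,0,0,0,0] = 0 := by
  unfold pvBIdx pvTb; simp

-- ===== VERDICT (by name: the statement is the Claim_ definition above) =====
theorem expand_k_lut_spec : Claim_equal_expand_k_lut := by
  intro constant k assignment _ hpre
  obtain ⟨hk, hps⟩ := hpre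
  unfold Spec_expand_k_lut expand_k_lut expand_k_lut_alt
  dsimp only
  -- the weight pass, as a mapped Nat-level list
  have hzs : ([0,0,0,0,0,0,0,0] : List Int)
      = (([0,0,0,0,0,0,0,0] : List Nat)).map (fun (w : Nat) => (w : Int)) := by decide
  rw [hzs]
  have hw := pvWeights_eq assignment 0 [0,0,0,0,0,0,0,0]
  rw [Nat.cast_zero] at hw
  rw [hw]
  apply PySem.List.foldl_congr_mem
  intro lut8 addr haddr
  rw [PySem.List.mem_pyRange_one] at haddr
  obtain ⟨h0, h256⟩ := haddr
  have haddr' : addr = ((addr.toNat : Nat) : Int) := (Int.toNat_of_nonneg h0).symm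
  have ha0 : addr.toNat < 256 := by omega
  rw [haddr']
  generalize addr.toNat = a at ha0 ⊢
  have ha : a < 256 := ha0
  -- A's inner index
  have hA := pvAIdx_eq a assignment hps 0 0
  rw [Nat.cast_zero] at hA
  rw [hA, Nat.zero_or]
  -- B's inner index
  have hB := pvBIdx_eq a (pvWN assignment 0 [0,0,0,0,0,0,0,0])
  rw [hB]
  rw [pvChain a ha assignment hps 0 [0,0,0,0,0,0,0,0] (by rfl), pvBIdx_zeros, Nat.zero_or]
  -- compare the two loop bodies
  rw [Int.shiftLeft_natCast_right]
  split_ifs with hlim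
  · rfl
  · have hz : @HShiftLeft.hShiftLeft Int Nat Int Int.instHShiftLeftNat 0 (((a : Int)).toNat) = (0:Int) := by
      have h := (Int.natCast_shiftLeft 0 (((a : Int)).toNat)).symm
      simpa using h
    rw [hz, PySem.Int.bor_zero]
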